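-- pv_equiv track=rewrite | github.com/jraymondli/usaco-1 | 2020/February/swapity_feb20_bronze/swap.py | calculate_swaps
-- ===== SOURCE A (Python) =====
-- def swap_section(line_swapping, indexes):
--     reversed_list = line_swapping[indexes[0]-1:indexes[1]:]
--     reversed_list.reverse()
--     final_list = []
--     done = False
--     for i in range(len(line_swapping)):
--         if not (indexes[0] <= i + 1 <= indexes[1]):
--             final_list.append(line_swapping[i])
--         elif not done:
--             final_list.extend(reversed_list)
--             done = True
--
--     return final_list
--
-- def calculate_swaps(data_vals):
--     nlist = data_vals[0]
--     k_swaps = data_vals[2]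
--     if k_swaps[0][1]-k_swaps[0][0] < k_swaps[1][1]-k_swaps[1][0]:
--         k = data_vals[1] % (k_swaps[0][1]-k_swaps[0][0]+1)
--     else:
--         k = data_vals[1] % (k_swaps[1][1] - k_swaps[1][0]+1)
--     if k_swaps[0][0]<k_swaps[0][1] < k_swaps[1][0]<k_swaps[1][1] or k_swaps[1][0]<k_swaps[1][1]<k_swaps[0][0] < k_swaps[0][1] or k_swaps[1][1]-k_swaps[1][0]+1 == len(nlist) or k_swaps[0][1]-k_swaps[0][0]+1 == len(nlist):
--         k = data_vals[1] % 4
--     for i in range(k):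
--         nlist = swap_section(nlist, k_swaps[0])
--         nlist = swap_section(nlist, k_swaps[1])
--     return nlist
-- ===== SOURCE B (Python) =====
-- # B: each reversal is one slice-concatenation (prefix + reversed slice + suffix)
-- # instead of A's per-element scan with a 'done' flag; the round count is computed
-- # as a single modulus (min of the two spans, or 4) and the rounds run in a
-- # count-down while loop.
-- def _rev_seg(l, a, b):
--     lo, hi = max(a - 1, 0), min(b, len(l))
--     if lo >= hi:
--         return list(l)
--     return l[:lo] + l[a - 1:b][::-1] + l[hi:]
--
-- def calculate_swaps(data_vals):
--     nlist, total, ks = data_vals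
--     (a1, b1), (a2, b2) = ks[0], ks[1]
--     if a1 < b1 < a2 < b2 or a2 < b2 < a1 < b1 \
--        or b2 - a2 + 1 == len(nlist) or b1 - a1 + 1 == len(nlist):
--         m = 4
--     else:
--         m = min(b1 - a1, b2 - a2) + 1
--     k = total % m
--     while k > 0:
--         nlist = _rev_seg(_rev_seg(nlist, a1, b1), a2, b2)
--         k -= 1
--     return nlist
-- ===== Notes on version B (the rewrite author's own statement) =====
-- stated objective: alternative
-- what changed: Each reversal step is one slice-concatenation formula (prefix + reversed slice + suffix) instead of A's element-by-element scan with a 'done' flag, the two modulus choices are folded into a single min-based modulus computed after the override test, and the rounds run via a count-down loop instead of a range loop.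
import Mathlib
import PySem

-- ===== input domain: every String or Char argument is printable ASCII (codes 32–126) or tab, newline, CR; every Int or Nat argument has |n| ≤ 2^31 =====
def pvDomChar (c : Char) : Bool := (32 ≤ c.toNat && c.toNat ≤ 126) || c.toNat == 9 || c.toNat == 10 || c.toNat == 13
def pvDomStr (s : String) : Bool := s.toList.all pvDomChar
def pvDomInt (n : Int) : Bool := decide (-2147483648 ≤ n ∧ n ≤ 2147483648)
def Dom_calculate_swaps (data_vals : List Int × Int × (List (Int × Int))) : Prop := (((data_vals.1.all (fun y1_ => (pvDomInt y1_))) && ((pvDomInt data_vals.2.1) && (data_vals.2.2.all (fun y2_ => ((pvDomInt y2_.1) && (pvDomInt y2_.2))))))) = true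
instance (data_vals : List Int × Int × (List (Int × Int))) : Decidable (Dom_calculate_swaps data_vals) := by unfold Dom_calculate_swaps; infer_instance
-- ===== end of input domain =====

-- B computes each reversal as one slice-concatenation formula instead of A's
-- per-element scan with a 'done' flag, folds the two k-choices into a single
-- modulus, and runs the rounds in a count-down loop (objective: alternative).

-- ===== PORT A =====
-- swap_section: builds the result element by element with a 'done' flag.
def swap_section (line : List Int) (indexes : Int × Int) : List Int :=
  let reversedList := (PySem.List.slice line (some (indexes.1 - 1)) (some indexes.2)).reverse
  ((List.range line.length).foldl (fun (st : List Int × Bool) (i : Nat) =>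
      if ¬ (indexes.1 ≤ (i : Int) + 1 ∧ (i : Int) + 1 ≤ indexes.2) then
        (st.1 ++ [line.getD i 0], st.2)
      else if st.2 = false then (st.1 ++ reversedList, true)
      else st) ([], false)).1

def calculate_swaps (data_vals : List Int × Int × (List (Int × Int))) : List Int :=
  let nlist := data_vals.1
  let total := data_vals.2.1
  let ks := data_vals.2.2
  let p1 := ks.getD 0 (0, 0)   -- ks[0]; Pre_ guarantees the index is in range
  let p2 := ks.getD 1 (0, 0)   -- ks[1]
  let k : Int :=
    if p1.2 - p1.1 < p2.2 - p2.1 then PySem.Int.mod total (p1.2 - p1.1 + 1)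
    else PySem.Int.mod total (p2.2 - p2.1 + 1)
  let k : Int :=
    if (p1.1 < p1.2 ∧ p1.2 < p2.1 ∧ p2.1 < p2.2) ∨ (p2.1 < p2.2 ∧ p2.2 < p1.1 ∧ p1.1 < p1.2)
       ∨ p2.2 - p2.1 + 1 = (nlist.length : Int) ∨ p1.2 - p1.1 + 1 = (nlist.length : Int) then
      PySem.Int.mod total 4
    else k
  (List.range k.toNat).foldl (fun l _ => swap_section (swap_section l p1) p2) nlist

-- ===== PORT B =====
-- _rev_seg: the reversal step as one slice-concatenation formula.
def rev_seg (l : List Int) (a b : Int) : List Int :=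
  let lo : Int := max (a - 1) 0
  let hi : Int := min b (l.length : Int)
  if hi ≤ lo then l
  else PySem.List.slice l none (some lo)
       ++ (PySem.List.slice l (some (a - 1)) (some b)).reverse
       ++ PySem.List.slice l (some hi) none

-- the count-down while loop of Source B, as recursion on the (non-negative) counter
def applyRounds : Nat → Int → Int → Int → Int → List Int → List Int
  | 0, _, _, _, _, l => l
  | Nat.succ k, a1, b1, a2, b2, l => applyRounds k a1 b1 a2 b2 (rev_seg (rev_seg l a1 b1) a2 b2)

def calculate_swaps_alt (data_vals : List Int × Int × (List (Int × Int))) : List Int :=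
  match data_vals with
  | (nlist, total, ks) =>
    match ks.getD 0 (0, 0), ks.getD 1 (0, 0) with
    | (a1, b1), (a2, b2) =>
      let m : Int :=
        if (a1 < b1 ∧ b1 < a2 ∧ a2 < b2) ∨ (a2 < b2 ∧ b2 < a1 ∧ a1 < b1)
           ∨ b2 - a2 + 1 = (nlist.length : Int) ∨ b1 - a1 + 1 = (nlist.length : Int) then 4
        else min (b1 - a1) (b2 - a2) + 1
      applyRounds (PySem.Int.mod total m).toNat a1 b1 a2 b2 nlist

-- ===== PRECONDITION & SPEC =====
-- Pre_ excludes exactly the inputs on which A raises: fewer than two swap pairs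
-- (IndexError on k_swaps[1]) or a zero first modulus (ZeroDivisionError).
def Pre_calculate_swaps (data_vals : List Int × Int × (List (Int × Int))) : Prop :=
  2 ≤ data_vals.2.2.length ∧
  min ((data_vals.2.2.getD 0 (0, 0)).2 - (data_vals.2.2.getD 0 (0, 0)).1)
      ((data_vals.2.2.getD 1 (0, 0)).2 - (data_vals.2.2.getD 1 (0, 0)).1) + 1 ≠ 0
instance (data_vals : List Int × Int × (List (Int × Int))) : Decidable (Pre_calculate_swaps data_vals) := by unfold Pre_calculate_swaps; infer_instance
def pvWitness_calculate_swaps : (List Int × Int × (List (Int × Int))) := ([5, 1, 4, 2, 3], 7, [(1, 3), (2, 5)])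

def Spec_calculate_swaps (data_vals : List Int × Int × (List (Int × Int))) (out : List Int) : Prop := out = calculate_swaps_alt data_vals
instance (data_vals : List Int × Int × (List (Int × Int))) (out : List Int) : Decidable (Spec_calculate_swaps data_vals out) := by unfold Spec_calculate_swaps; infer_instance

-- ===== CLAIM (what is proved, stated in full; the proofs are below) =====
def Claim_equal_calculate_swaps : Prop := ∀ (data_vals : List Int × Int × (List (Int × Int))), Dom_calculate_swaps data_vals → Pre_calculate_swaps data_vals → Spec_calculate_swaps data_vals (calculate_swaps data_vals)

-- ===== LEMMAS AND PROOFS =====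

-- Invariant of A's scan: after m steps the accumulator is
-- prefix-before-region ++ (reversed block if the region was entered) ++ elements past the region,
-- and the done flag records whether the region was entered.
theorem swap_fold (l : List Int) (a b : Int) (rev : List Int) :
    ∀ m, m ≤ l.length →
    (List.range m).foldl (fun (st : List Int × Bool) (i : Nat) =>
        if ¬ (a ≤ (i : Int) + 1 ∧ (i : Int) + 1 ≤ b) then
          (st.1 ++ [l.getD i 0], st.2)
        else if st.2 = false then (st.1 ++ rev, true)
        else st) ([], false)
    = (l.take (min m (a - 1).toNat)
        ++ (if (a - 1).toNat < min m b.toNat then rev else [])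
        ++ (l.take m).drop (max b.toNat (a - 1).toNat),
       decide ((a - 1).toNat < min m b.toNat)) := by
  intro m
  induction m with
  | zero => simp
  | succ m ih =>
    intro h
    rw [List.range_succ, List.foldl_append, ih (by omega)]
    simp only [List.foldl_cons, List.foldl_nil]
    have hm : m < l.length := by omega
    by_cases hin : a ≤ (m : Int) + 1 ∧ (m : Int) + 1 ≤ b
    · -- m is inside the region
      have hlo : (a - 1).toNat ≤ m := by omega
      have hhi : m < b.toNat := by omega
      rw [if_neg (not_not_intro hin)]
      by_cases hd : (a - 1).toNat < min m b.toNat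
      · -- region already entered: state unchanged
        have hd' : (a - 1).toNat < min (m + 1) b.toNat := by omega
        rw [decide_eq_true hd, if_neg (by simp)]
        simp only [Prod.mk.injEq]
        refine ⟨?_, (decide_eq_true hd').symm ▸ (decide_eq_true hd) ▸ rfl⟩
        rw [if_pos hd, if_pos hd',
          (by omega : min (m + 1) (a - 1).toNat = min m (a - 1).toNat),
          List.drop_eq_nil_of_le (le_trans (List.length_take_le _ _) (by omega)),
          List.drop_eq_nil_of_le (le_trans (List.length_take_le _ _) (by omega))]
      · -- first index of the region: append rev, set the flag
        have hd' : (a - 1).toNat < min (m + 1) b.toNat := by omega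
        rw [decide_eq_false hd, if_pos rfl]
        simp only [Prod.mk.injEq]
        refine ⟨?_, (decide_eq_true hd').symm⟩
        rw [if_neg hd, if_pos hd',
          (by omega : min (m + 1) (a - 1).toNat = min m (a - 1).toNat),
          List.drop_eq_nil_of_le (le_trans (List.length_take_le _ _) (by omega)),
          List.drop_eq_nil_of_le (le_trans (List.length_take_le _ _) (by omega))]
        simp
    · -- m is outside the region: append l[m]
      have hflag : ((a - 1).toNat < min (m + 1) b.toNat) ↔ ((a - 1).toNat < min m b.toNat) := by
        omega
      rw [if_pos hin]
      simp only [Prod.mk.injEq]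
      refine ⟨?_, decide_eq_decide.mpr hflag.symm⟩
      by_cases hmlo : m < (a - 1).toNat
      · -- before the region
        rw [if_neg (by omega), if_neg (by omega),
          (by omega : min (m + 1) (a - 1).toNat = m + 1),
          (by omega : min m (a - 1).toNat = m),
          List.drop_eq_nil_of_le (le_trans (List.length_take_le _ _) (by omega)),
          List.drop_eq_nil_of_le (le_trans (List.length_take_le _ _) (by omega)),
          List.take_add_one, List.getElem?_eq_getElem hm, List.getD_eq_getElem l 0 hm]
        simp
      · -- past the region
        have hge : b.toNat ≤ m := by omega
        have h2 : (l.take (m + 1)).drop (max b.toNat (a - 1).toNat)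
            = (l.take m).drop (max b.toNat (a - 1).toNat) ++ [l.getD m 0] := by
          rw [List.take_add_one, List.getElem?_eq_getElem hm,
            List.drop_append_of_le_length (by rw [List.length_take]; omega)]
          simp [List.getD, List.getElem?_eq_getElem hm]
        rw [h2, (by omega : min (m + 1) (a - 1).toNat = min m (a - 1).toNat)]
        by_cases hc : (a - 1).toNat < min m b.toNat
        · rw [if_pos hc, if_pos (by omega)]; simp [List.append_assoc]
        · rw [if_neg hc, if_neg (by omega)]; simp [List.append_assoc]

theorem swap_eq (l : List Int) (p : Int × Int) : swap_section l p = rev_seg l p.1 p.2 := by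
  unfold swap_section rev_seg
  dsimp only
  rw [swap_fold l p.1 p.2 _ l.length le_rfl]
  simp only [List.take_length]
  by_cases hc : (p.1 - 1).toNat < min l.length p.2.toNat
  · rw [if_neg (by omega : ¬ min p.2 (l.length : Int) ≤ max (p.1 - 1) 0)]
    have e1 : PySem.List.slice l none (some (max (p.1 - 1) 0)) = l.take (min l.length (p.1 - 1).toNat) := by
      rw [PySem.List.slice_to _ (by omega)]
      congr 1
      omega
    have e2 : PySem.List.slice l (some (min p.2 (l.length : Int))) none
        = l.drop (max p.2.toNat (p.1 - 1).toNat) := by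
      rw [PySem.List.slice_from _ (by omega)]
      by_cases hbig : l.length ≤ p.2.toNat
      · rw [List.drop_eq_nil_of_le (by omega), List.drop_eq_nil_of_le (by omega)]
      · congr 1
        omega
    rw [e1, e2, if_pos hc]
  · rw [if_pos (by omega : min p.2 (l.length : Int) ≤ max (p.1 - 1) 0), if_neg hc]
    by_cases hbl : p.2.toNat ≤ (p.1 - 1).toNat
    · by_cases hln : (p.1 - 1).toNat ≤ l.length
      · rw [(by omega : min l.length (p.1 - 1).toNat = (p.1 - 1).toNat), max_eq_right hbl]
        simp [List.take_append_drop]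
      · rw [(by omega : min l.length (p.1 - 1).toNat = l.length),
          List.drop_eq_nil_of_le (by omega : l.length ≤ max p.2.toNat (p.1 - 1).toNat)]
        simp
    · rw [(by omega : min l.length (p.1 - 1).toNat = l.length),
        List.drop_eq_nil_of_le (by omega : l.length ≤ max p.2.toNat (p.1 - 1).toNat)]
      simp

-- applyRounds commutes with one round
theorem applyRounds_shift (k : Nat) (a1 b1 a2 b2 : Int) (l : List Int) :
    applyRounds (k + 1) a1 b1 a2 b2 l
      = rev_seg (rev_seg (applyRounds k a1 b1 a2 b2 l) a1 b1) a2 b2 := by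
  induction k generalizing l with
  | zero => rfl
  | succ k ih =>
    show applyRounds (k + 1) a1 b1 a2 b2 (rev_seg (rev_seg l a1 b1) a2 b2) = _
    rw [ih]
    rfl

-- A's round loop over range(k) equals B's count-down recursion
theorem foldl_eq_applyRounds (k : Nat) (p1 p2 : Int × Int) (l : List Int) :
    (List.range k).foldl (fun l _ => swap_section (swap_section l p1) p2) l
      = applyRounds k p1.1 p1.2 p2.1 p2.2 l := by
  induction k with
  | zero => rfl
  | succ k ih =>
    rw [List.range_succ, List.foldl_append, ih]
    simp only [List.foldl_cons, List.foldl_nil]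
    rw [swap_eq, swap_eq, ← applyRounds_shift]

-- ===== VERDICT (by name: the statement is the Claim_ definition above) =====
theorem calculate_swaps_spec : Claim_equal_calculate_swaps := by
  intro dv _ hpre
  obtain ⟨nlist, total, ks⟩ := dv
  unfold Spec_calculate_swaps calculate_swaps calculate_swaps_alt
  rcases hp : ks.getD 0 (0, 0) with ⟨a1, b1⟩
  rcases hq : ks.getD 1 (0, 0) with ⟨a2, b2⟩
  simp only [hp, hq]
  rw [foldl_eq_applyRounds]
  congr 1
  split_ifs with hcond hlt
  · rfl
  · rw [min_eq_left (le_of_lt hlt)]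
  · rw [min_eq_right (le_of_not_gt hlt)]
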